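-- pv_equiv track=rewrite | github.com/WoungSub-Byun/algorithm-codingtest | programmers/큰수만들기.py | solution
-- ===== SOURCE A (Python) =====
-- def solution(number, k):
--     list_number = list(number)
--     answer = []
--     answer_len = len(list_number) - k
--     while answer_len != 0:
--         answer.append(max(list_number[:answer_len]))
--         list_number.remove(max(list_number[:answer_len]))
--         answer_len-=1
--     return ''.join(answer)
-- ===== SOURCE B (Python) =====
-- def solution(number, k):
--     keep = len(number) - k
--     prefix = [number[i] for i in range(keep)]
--     return ''.join(sorted(prefix, reverse=True))
-- ===== Notes on version B (the rewrite author's own statement) =====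
-- stated objective: faster
-- what changed: A's repeated max-of-prefix + list.remove loop (a quadratic selection sort of the first len(number)-k characters) is replaced by collecting that prefix once and handing it to one library sort in descending order.
import Mathlib
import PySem

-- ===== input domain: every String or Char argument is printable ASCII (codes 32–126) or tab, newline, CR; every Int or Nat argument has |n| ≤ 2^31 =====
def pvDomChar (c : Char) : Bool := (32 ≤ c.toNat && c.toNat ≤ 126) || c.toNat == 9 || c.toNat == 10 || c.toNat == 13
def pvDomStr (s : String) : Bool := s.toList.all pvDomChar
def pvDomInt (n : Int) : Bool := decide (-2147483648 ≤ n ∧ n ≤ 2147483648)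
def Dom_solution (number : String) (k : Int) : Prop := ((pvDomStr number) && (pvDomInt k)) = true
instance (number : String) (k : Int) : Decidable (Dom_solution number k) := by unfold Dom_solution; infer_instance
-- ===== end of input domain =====

-- B replaces A's quadratic max-of-prefix + remove loop with one descending sort of the
-- first len(number)-k characters (same string; faster).

-- ===== PORT A =====
-- the while loop: fuel = answer_len (the loop variable; under Pre_ it starts ≥ 0 and
-- counts down to 0). Where Python would raise (max()/remove on an exhausted list,
-- unreachable under Pre_) the match falls back to returning the accumulator.
def solutionLoopA : Nat → List Char → List Char → List Char
  | 0, _, answer => answer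
  | m + 1, list_number, answer =>
    match PySem.List.max? (PySem.List.slice list_number none (some ((m + 1 : Nat) : Int))) (fun x => x) with
    | none => answer          -- Python: ValueError from max([]) — outside Pre_
    | some v =>
      match PySem.List.remove? list_number v with
      | none => answer        -- Python: ValueError from remove — unreachable
      | some rest => solutionLoopA m rest (answer ++ [v])

def solution (number : String) (k : Int) : String :=
  let list_number := number.toList
  let answer_len : Int := PySem.List.len list_number - k
  String.ofList (solutionLoopA answer_len.toNat list_number [])

-- ===== PORT B =====
-- number[i] is PySem.List.pyGetD; inside Pre_ every i of range(keep) is in range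
-- (for k < 0 Python raises IndexError there — outside Pre_).
def solution_alt (number : String) (k : Int) : String :=
  let keep : Int := PySem.Str.len number - k
  let pre := (PySem.List.pyRange 0 keep).map (fun i => PySem.List.pyGetD number.toList i ' ')
  String.ofList (PySem.List.sorted pre (fun x => x) true)

-- ===== PRECONDITION & SPEC =====
-- Pre_ excludes exactly the inputs on which A raises ValueError (max() of an exhausted list): k < 0 or k > len(number).
def Pre_solution (number : String) (k : Int) : Prop := 0 ≤ k ∧ k ≤ PySem.Str.len number
instance (number : String) (k : Int) : Decidable (Pre_solution number k) := by unfold Pre_solution; infer_instance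

def pvWitness_solution : String × Int := ("4177252841", 4)

def Spec_solution (number : String) (k : Int) (out : String) : Prop := out = solution_alt number k
instance (number : String) (k : Int) (out : String) : Decidable (Spec_solution number k out) := by unfold Spec_solution; infer_instance

-- ===== CLAIM (what is proved, stated in full; the proofs are below) =====
def Claim_equal_solution : Prop := ∀ (number : String) (k : Int), Dom_solution number k → Pre_solution number k → Spec_solution number k (solution number k)

-- ===== LEMMAS AND PROOFS =====

-- B's comprehension [number[i] for i in range(keep)] is the prefix take m when m ≤ len
lemma map_getD_range_take (xs : List Char) (d : Char) (m : Nat) (hm : m ≤ xs.length) :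
    (List.range m).map (fun j => xs.getD j d) = xs.take m := by
  apply List.ext_getElem
  · simp [hm]
  · intro i h1 h2
    simp at h1 h2
    simp [List.getD_eq_getElem?_getD, List.getElem?_eq_getElem (by omega : i < xs.length)]

-- removing the first occurrence of an element of the prefix commutes with taking the prefix
lemma take_erase_of_mem_take (v : Char) :
    ∀ (cs : List Char) (m : Nat), v ∈ cs.take m → (cs.erase v).take (m - 1) = (cs.take m).erase v := by
  intro cs
  induction cs with
  | nil => intro m h; simp at h
  | cons c cs ih =>
    intro m h
    cases m with
    | zero => simp at h
    | succ m =>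
      by_cases hc : c = v
      · subst hc; simp [List.erase_cons_head]
      · have hv : v ∈ cs.take m := by
          simpa [hc, List.take_succ_cons, Ne.symm hc] using h
        have hm : 1 ≤ m := by
          cases m with
          | zero => simp at hv
          | succ m => omega
        have hbeq : (c == v) = false := by simp [hc]
        have hstep : m + 1 - 1 = (m - 1) + 1 := by omega
        rw [List.take_succ_cons]
        simp only [List.erase_cons, hbeq, Bool.false_eq_true, if_false]
        rw [hstep, List.take_succ_cons, ih m hv]

-- a descending sort of p starts with p's maximum v, followed by a descending sort of p minus v
lemma sorted_rev_cons_max (p : List Char) (v : Char) (hv : v ∈ p) (hmax : ∀ y ∈ p, y ≤ v) :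
    PySem.List.sorted p (fun x => x) true = v :: PySem.List.sorted (p.erase v) (fun x => x) true := by
  apply List.Perm.eq_of_pairwise (le := fun a b : Char => b ≤ a)
  · exact fun a b _ _ h1 h2 => le_antisymm h2 h1
  · exact PySem.List.sorted_pairwise_rev p (fun x => x)
  · refine List.Pairwise.cons ?_ ?_
    · intro y hy
      exact hmax y (List.mem_of_mem_erase ((PySem.List.mem_sorted ..).mp hy))
    · exact PySem.List.sorted_pairwise_rev (p.erase v) (fun x => x)
  · exact ((PySem.List.sorted_perm p (fun x => x) true).trans (List.perm_cons_erase hv)).trans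
      (List.Perm.cons v (PySem.List.sorted_perm (p.erase v) (fun x => x) true).symm)

-- A's loop is selection sort: with fuel m ≤ |cs| it appends the descending sort of cs.take m
lemma solutionLoopA_eq_sorted :
    ∀ (m : Nat) (cs ans : List Char), m ≤ cs.length →
      solutionLoopA m cs ans = ans ++ PySem.List.sorted (cs.take m) (fun x => x) true := by
  intro m
  induction m with
  | zero => intro cs ans _; simp [solutionLoopA, PySem.List.sorted]
  | succ m ih =>
    intro cs ans hm
    have hcs : cs ≠ [] := by intro h; rw [h] at hm; simp at hm
    have hp : cs.take (m + 1) ≠ [] := by simp [List.take_eq_nil_iff, hcs]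
    have hslice : PySem.List.slice cs none (some ((m + 1 : Nat) : Int)) = cs.take (m + 1) :=
      PySem.List.slice_to_natCast ..
    obtain ⟨v, hv⟩ : ∃ v, PySem.List.max? (cs.take (m + 1)) (fun x => x) = some v := by
      cases h : PySem.List.max? (cs.take (m + 1)) (fun x => x) with
      | none => exact absurd ((PySem.List.max?_eq_none_iff _ _).mp h) hp
      | some v => exact ⟨v, rfl⟩
    have hvmem : v ∈ cs.take (m + 1) := PySem.List.max?_mem hv
    have hvmax : ∀ y ∈ cs.take (m + 1), y ≤ v := by
      intro y hy; simpa using PySem.List.max?_isMax hv y hy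
    have hvcs : v ∈ cs := List.mem_of_mem_take hvmem
    have hrem : PySem.List.remove? cs v = some (cs.erase v) :=
      PySem.List.remove?_eq_some_erase cs v hvcs
    have hlen : m ≤ (cs.erase v).length := by
      rw [List.length_erase_of_mem hvcs]; omega
    have htake : (cs.erase v).take m = (cs.take (m + 1)).erase v := by
      simpa using take_erase_of_mem_take v cs (m + 1) hvmem
    rw [solutionLoopA, hslice, hv]
    simp only [hrem]
    rw [ih (cs.erase v) (ans ++ [v]) hlen, htake,
        sorted_rev_cons_max (cs.take (m + 1)) v hvmem hvmax]
    simp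

-- ===== VERDICT (by name: the statement is the Claim_ definition above) =====
theorem solution_spec : Claim_equal_solution := by
  intro number k _ hpre
  obtain ⟨hk0, hkn⟩ := hpre
  unfold Spec_solution solution solution_alt
  dsimp only
  have hlen : PySem.Str.len number = (number.toList.length : Int) := by
    simp [PySem.Str.len_eq]
  have hkeep0 : (0 : Int) ≤ PySem.Str.len number - k := by omega
  have hle : (PySem.Str.len number - k).toNat ≤ number.toList.length := by
    rw [hlen] at hkeep0 ⊢; omega
  have hpre : (PySem.List.pyRange 0 (PySem.Str.len number - k)).map
      (fun i => PySem.List.pyGetD number.toList i ' ') =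
      number.toList.take (PySem.Str.len number - k).toNat := by
    obtain ⟨m, hmdef⟩ : ∃ m : Nat, PySem.Str.len number - k = (m : Int) :=
      ⟨(PySem.Str.len number - k).toNat, by omega⟩
    have hmle : m ≤ number.toList.length := by
      rw [hlen] at hmdef; omega
    rw [hmdef, PySem.List.pyRange_zero_natCast, List.map_map, Int.toNat_natCast]
    simp only [Function.comp_def, PySem.List.pyGetD_natCast]
    exact map_getD_range_take number.toList ' ' m hmle
  rw [hpre]
  have hlA : PySem.List.len number.toList - k = PySem.Str.len number - k := by
    simp [PySem.List.len_eq]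
  rw [hlA, solutionLoopA_eq_sorted _ _ _ hle]
  rfl
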